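-- pv_equiv track=rewrite | github.com/arin17bishwa/myCP_sols | CF/1352A.py | func
-- ===== SOURCE A (Python) =====
-- def func(n):
--     ans = []
--     s = str(n)
--     l = len(s)
--     for j in range(l):
--         if s[j] == '0':
--             continue
--         ans.append(str(int(s[j]) * pow(10, l - 1 - j)))
--     return '\n'.join((str(len(ans)), ' '.join(ans)))
--
--     pass
-- ===== SOURCE B (Python) =====
-- def func(n):
--     ans = []
--     mult = 1
--     while n > 0:
--         d = n % 10
--         n //= 10
--         if d:
--             ans.append(str(d * mult))
--         mult *= 10
--     ans.reverse()
--     return '\n'.join((str(len(ans)), ' '.join(ans)))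
-- ===== Notes on version B (the rewrite author's own statement) =====
-- stated objective: alternative
-- what changed: Replaces the str(n)-and-index-characters decomposition by pure arithmetic digit extraction (n % 10, n //= 10) with a running place-value multiplier, collecting addends least-significant-first and reversing them.
import Mathlib
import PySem

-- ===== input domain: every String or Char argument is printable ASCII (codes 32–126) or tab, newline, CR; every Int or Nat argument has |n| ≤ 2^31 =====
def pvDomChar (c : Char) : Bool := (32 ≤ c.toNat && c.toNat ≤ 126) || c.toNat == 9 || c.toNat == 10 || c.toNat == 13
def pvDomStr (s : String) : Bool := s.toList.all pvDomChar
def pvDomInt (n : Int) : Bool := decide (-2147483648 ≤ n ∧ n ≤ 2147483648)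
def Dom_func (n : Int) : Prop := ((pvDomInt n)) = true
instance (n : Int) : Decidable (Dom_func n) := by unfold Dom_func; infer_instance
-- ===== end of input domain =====

-- B replaces A's string-of-n character indexing by arithmetic digit extraction (n % 10, n //= 10)
-- with a running place-value multiplier: an alternative decomposition, same output string.

-- ===== PORT A =====
-- A: s = str(n); for j in range(len(s)): skip '0', else append str(int(s[j]) * pow(10, l-1-j));
-- str(n) is handled as its character list (PySem.Int.toStr = String.ofList ∘ PySem.Int.toChars).
-- int(s[j]) is (PySem.Int.ofChars? [c]).getD 0 — ofChars? is none exactly where Python raises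
-- ValueError (the '-' sign of a negative n), and those inputs are excluded by Pre_func.
-- pow(10, l-1-j) has a nonnegative exponent for every j in range(l); ported as 10 ^ (l-1-j).toNat.
def func (n : Int) : String :=
  let s := PySem.Int.toChars n
  let l : Int := s.length
  let ans := (PySem.List.pyRange 0 l 1).foldl (fun ans j =>
    if (PySem.List.pyGet? s j).getD ' ' = '0' then ans
    else ans ++ [PySem.Int.toStr
      (((PySem.Int.ofChars? [(PySem.List.pyGet? s j).getD ' ']).getD 0) * 10 ^ (l - 1 - j).toNat)]) []
  PySem.Str.join "\n" [PySem.Int.toStr (ans.length : Int), PySem.Str.join " " ans]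

-- ===== PORT B =====
-- the while-loop of Source B: while n > 0: d = n % 10; n //= 10; if d: append str(d*mult); mult *= 10
def funcAltLoop (m mult : Int) (ans : List String) : List String :=
  if 0 < m then
    funcAltLoop (PySem.Int.floordiv m 10) (mult * 10)
      (if PySem.Int.mod m 10 ≠ 0 then ans ++ [PySem.Int.toStr (PySem.Int.mod m 10 * mult)] else ans)
  else ans
termination_by m.toNat
decreasing_by
  rw [PySem.Int.floordiv_eq_ediv_of_pos (by omega)]
  omega

def func_alt (n : Int) : String :=
  let ans := (funcAltLoop n 1 []).reverse
  PySem.Str.join "\n" [PySem.Int.toStr (ans.length : Int), PySem.Str.join " " ans]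

-- ===== PRECONDITION & SPEC =====
-- Pre_ excludes exactly the negative n, on which A raises ValueError (int('-') on the sign character).
def Pre_func (n : Int) : Prop := 0 ≤ n
instance (n : Int) : Decidable (Pre_func n) := by unfold Pre_func; infer_instance
def pvWitness_func : Int := 1207

def Spec_func (n : Int) (out : String) : Prop := out = func_alt n
instance (n : Int) (out : String) : Decidable (Spec_func n out) := by unfold Spec_func; infer_instance

-- ===== CLAIM (what is proved, stated in full; the proofs are below) =====
def Claim_equal_func : Prop := ∀ (n : Int), Dom_func n → Pre_func n → Spec_func n (func n)

-- ===== LEMMAS AND PROOFS =====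

-- the addends both programs collect, least-significant digit first; `mult` is the current place value
def digitAdds : List Nat → Int → List String
  | [], _ => []
  | d :: ds, mult =>
      (if d ≠ 0 then [PySem.Int.toStr ((d : Int) * mult)] else []) ++ digitAdds ds (mult * 10)

lemma ofChars?_digitChar (d : Nat) (hd : d < 10) :
    PySem.Int.ofChars? [Nat.digitChar d] = some (d : Int) := by
  interval_cases d <;> decide

lemma digitChar_eq_zero_iff (d : Nat) (hd : d < 10) :
    Nat.digitChar d = '0' ↔ d = 0 := by
  interval_cases d <;> decide

-- B's loop appends exactly the addends of the base-10 digits of m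
lemma funcAltLoop_eq_aux (k : Nat) : ∀ (m : Int), 0 ≤ m → m.toNat ≤ k →
    ∀ (mult : Int) (ans : List String),
    funcAltLoop m mult ans = ans ++ digitAdds (Nat.digits 10 m.toNat) mult := by
  induction k with
  | zero =>
    intro m hm hk mult ans
    rw [funcAltLoop]
    have : ¬ 0 < m := by omega
    simp [this, show m.toNat = 0 by omega, digitAdds]
  | succ k ih =>
    intro m hm hk mult ans
    rw [funcAltLoop]
    by_cases h : 0 < m
    · simp only [h, if_pos]
      have h10 : PySem.Int.floordiv m 10 = (↑(m.toNat / 10) : Int) := by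
        rw [PySem.Int.floordiv_eq_ediv_of_pos (by omega)]
        omega
      have hmod : PySem.Int.mod m 10 = (↑(m.toNat % 10) : Int) := by
        rw [PySem.Int.mod_eq_emod_of_pos (by omega)]
        omega
      rw [h10, hmod, ih _ (by positivity) (by omega) _ _]
      rw [Nat.digits_def' (by norm_num : 1 < 10) (by omega : 0 < m.toNat)]
      simp only [Int.toNat_natCast, digitAdds]
      by_cases hd : m.toNat % 10 = 0
      · simp [hd]
      · rw [if_pos (show ¬((m.toNat % 10 : Nat) : Int) = 0 from by exact_mod_cast hd)]
        simp [hd]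
    · simp [h, show m.toNat = 0 by omega, digitAdds]

-- the body of A's loop over s = str(m), with an exponent offset e for the digits already split off
def funcBody (s : List Char) (e : Nat) (ans : List String) (j : Int) : List String :=
  if (PySem.List.pyGet? s j).getD ' ' = '0' then ans
  else ans ++ [PySem.Int.toStr
    (((PySem.Int.ofChars? [(PySem.List.pyGet? s j).getD ' ']).getD 0)
      * 10 ^ (((s.length : Int) - 1 - j).toNat + e))]

lemma func_loop_small (m : Nat) (hm : m < 10) (e : Nat) (ans : List String) :
    (PySem.List.pyRange 0 ((Nat.toDigits 10 m).length : Int) 1).foldl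
      (funcBody (Nat.toDigits 10 m) e) ans
    = ans ++ (digitAdds (Nat.digits 10 m) (10 ^ e)).reverse := by
  rw [Nat.toDigits_of_lt_base hm]
  by_cases h0 : m = 0
  · subst h0
    simp [show PySem.List.pyRange 0 1 1 = [0] from by decide, funcBody, digitAdds,
      show Nat.digitChar 0 = '0' from rfl]
  · have hne : Nat.digitChar m ≠ '0' := fun h => h0 ((digitChar_eq_zero_iff m hm).mp h)
    have hdig : Nat.digits 10 m = [m] := by
      rw [Nat.digits_def' (by norm_num : 1 < 10) (Nat.pos_of_ne_zero h0)]
      simp [Nat.mod_eq_of_lt hm, Nat.div_eq_of_lt hm]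
    simp [show PySem.List.pyRange 0 1 1 = [0] from by decide, funcBody, hne,
      ofChars?_digitChar m hm, hdig, digitAdds, h0]

-- A's loop over str(m) collects the nonzero-digit addends, most-significant first
lemma func_loop_aux (k : Nat) : ∀ (m : Nat), m ≤ k → ∀ (e : Nat) (ans : List String),
    (PySem.List.pyRange 0 ((Nat.toDigits 10 m).length : Int) 1).foldl
      (funcBody (Nat.toDigits 10 m) e) ans
    = ans ++ (digitAdds (Nat.digits 10 m) (10 ^ e)).reverse := by
  induction k with
  | zero =>
    intro m hmk e ans
    exact func_loop_small m (by omega) e ans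
  | succ k ih =>
    intro m hmk e ans
    by_cases hm : m < 10
    · exact func_loop_small m hm e ans
    · have h10 : 10 ≤ m := by omega
      rw [Nat.toDigits_of_base_le (by norm_num : 1 < 10) h10]
      have hlen : (((Nat.toDigits 10 (m / 10) ++ [Nat.digitChar (m % 10)]).length : Nat) : Int)
          = ((Nat.toDigits 10 (m / 10)).length : Int) + 1 := by
        simp
      rw [hlen, PySem.List.pyRange_one_succ_right (by positivity), List.foldl_append]
      -- the fold over the prefix is the fold for m / 10 with exponent offset e + 1
      have hcongr : ∀ (acc : List String),
          ∀ j ∈ PySem.List.pyRange 0 ((Nat.toDigits 10 (m / 10)).length : Int) 1,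
          funcBody (Nat.toDigits 10 (m / 10) ++ [Nat.digitChar (m % 10)]) e acc j
          = funcBody (Nat.toDigits 10 (m / 10)) (e + 1) acc j := by
        intro acc j hj
        rw [PySem.List.mem_pyRange_one] at hj
        have hjlt : j.toNat < (Nat.toDigits 10 (m / 10)).length := by omega
        have hget : PySem.List.pyGet? (Nat.toDigits 10 (m / 10) ++ [Nat.digitChar (m % 10)]) j
            = PySem.List.pyGet? (Nat.toDigits 10 (m / 10)) j := by
          rw [PySem.List.pyGet?_of_nonneg _ hj.1, PySem.List.pyGet?_of_nonneg _ hj.1,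
            List.getElem?_append_left hjlt]
        have hexp : ((((Nat.toDigits 10 (m / 10) ++ [Nat.digitChar (m % 10)]).length : Int)
              - 1 - j).toNat + e)
            = ((((Nat.toDigits 10 (m / 10)).length : Int) - 1 - j).toNat + (e + 1)) := by
          simp only [List.length_append, List.length_cons, List.length_nil]
          omega
        simp only [funcBody, hget, hexp]
      rw [PySem.List.foldl_congr_mem _ _ _ _ hcongr, ih (m / 10) (by omega) (e + 1) ans]
      -- the last index reads the last digit of m at place value 10 ^ e
      have hdig : Nat.digits 10 m = m % 10 :: Nat.digits 10 (m / 10) :=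
        Nat.digits_def' (by norm_num : 1 < 10) (by omega)
      rw [hdig]
      by_cases hd : m % 10 = 0
      · simp [funcBody, hd, digitAdds, pow_succ,
          show Nat.digitChar 0 = '0' from rfl]
      · have hne : Nat.digitChar (m % 10) ≠ '0' :=
          fun h => hd ((digitChar_eq_zero_iff (m % 10) (by omega)).mp h)
        simp [funcBody, hd, hne, ofChars?_digitChar (m % 10) (by omega),
          digitAdds, pow_succ]

-- ===== VERDICT (by name: the statement is the Claim_ definition above) =====
theorem func_spec : Claim_equal_func := by
  intro n _ hpre
  have hpre' : 0 ≤ n := hpre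
  unfold Spec_func func func_alt
  have hs : PySem.Int.toChars n = Nat.toDigits 10 n.toNat := by
    unfold PySem.Int.toChars
    rw [if_neg (by omega)]
  simp only [hs]
  have hbody : (fun (ans : List String) (j : Int) =>
      if (PySem.List.pyGet? (Nat.toDigits 10 n.toNat) j).getD ' ' = '0' then ans
      else ans ++ [PySem.Int.toStr
        (((PySem.Int.ofChars? [(PySem.List.pyGet? (Nat.toDigits 10 n.toNat) j).getD ' ']).getD 0)
          * 10 ^ ((((Nat.toDigits 10 n.toNat).length : Int)) - 1 - j).toNat)])
      = funcBody (Nat.toDigits 10 n.toNat) 0 := by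
    funext ans j
    simp [funcBody]
  rw [hbody, func_loop_aux n.toNat n.toNat le_rfl 0 [],
    funcAltLoop_eq_aux n.toNat n hpre' le_rfl 1 []]
  norm_num
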